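-- pv_equiv track=rewrite | github.com/Mesteriis/iris | backend/src/apps/news/services.py | _merge_mapping
-- ===== SOURCE A (Python) =====
-- from typing import Any
--
-- def _merge_mapping(base: dict[str, Any], patch: dict[str, Any] | None) -> dict[str, Any]:
--     merged = dict(base)
--     if patch is None:
--         return merged
--     for key, value in patch.items():
--         if value is None:
--             merged.pop(key, None)
--         else:
--             merged[key] = value
--     return merged
-- ===== SOURCE B (Python) =====
-- from typing import Any
--
--
-- def _merge_mapping(base: dict[str, Any], patch: dict[str, Any] | None) -> dict[str, Any]:
--     # Build each output entry positionally: walk base once, looking each key up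
--     # in patch, then append the genuinely new patch keys. No copy is mutated.
--     if patch is None:
--         return dict(base)
--     kept = []
--     for k, v in base.items():
--         if k not in patch:
--             kept.append((k, v))
--         elif patch[k] is not None:
--             kept.append((k, patch[k]))
--     new = [(k, v) for k, v in patch.items() if v is not None and k not in base]
--     return dict(kept + new)
-- ===== Notes on version B (the rewrite author's own statement) =====
-- stated objective: alternative
-- what changed: A copies base and mutates the copy while iterating patch (pop on None, assign otherwise); B never mutates a merged dict: it walks base once resolving each key by lookup into patch, collects the surviving (key,value) pairs, appends the patch keys absent from base, and builds the result dict once from that list.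
import Mathlib
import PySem

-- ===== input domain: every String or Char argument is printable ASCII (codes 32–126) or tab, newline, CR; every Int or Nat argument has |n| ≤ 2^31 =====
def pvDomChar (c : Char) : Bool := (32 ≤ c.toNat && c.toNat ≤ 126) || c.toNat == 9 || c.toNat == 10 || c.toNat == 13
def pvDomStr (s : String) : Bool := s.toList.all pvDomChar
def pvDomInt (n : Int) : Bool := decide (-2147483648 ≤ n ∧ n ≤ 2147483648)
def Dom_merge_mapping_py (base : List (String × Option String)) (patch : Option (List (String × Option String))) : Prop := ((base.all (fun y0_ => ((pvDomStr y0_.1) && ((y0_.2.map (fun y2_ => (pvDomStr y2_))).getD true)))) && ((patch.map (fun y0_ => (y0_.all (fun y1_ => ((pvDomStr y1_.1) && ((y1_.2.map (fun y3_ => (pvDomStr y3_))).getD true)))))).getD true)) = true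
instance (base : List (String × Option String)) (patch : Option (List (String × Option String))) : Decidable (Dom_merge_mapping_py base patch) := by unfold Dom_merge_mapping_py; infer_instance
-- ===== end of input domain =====

-- B builds the result without mutating a merged dict: one walk over base resolving each key by
-- lookup into patch, then the patch keys absent from base are appended (objective: alternative).

-- ===== PORT A =====
def merge_mapping_py (base : List (String × Option String)) (patch : Option (List (String × Option String))) : List (String × Option String) :=
  let merged : PySem.Dict String (Option String) := PySem.Dict.ofList base   -- merged = dict(base)
  match patch with
  | none => merged.items                                                     -- if patch is None: return merged
  | some p =>                                                                -- for key, value in patch.items(): …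
    (p.foldl (fun m kv =>
        if kv.2.isNone then m.erase kv.1                                     -- merged.pop(key, None)
        else m.insert kv.1 kv.2) merged).items                               -- merged[key] = value

-- ===== PORT B =====
def merge_mapping_py_alt (base : List (String × Option String)) (patch : Option (List (String × Option String))) : List (String × Option String) :=
  match patch with
  | none => (PySem.Dict.ofList base).items                                   -- return dict(base)
  | some p =>
    let kept := base.foldl (fun acc kv =>                                    -- for k, v in base.items(): …
      match p.find? (fun q => q.1 == kv.1) with
      | none => acc ++ [kv]                                                  -- if k not in patch: kept.append((k, v))
      | some q => if q.2.isSome then acc ++ [(kv.1, q.2)] else acc)          -- elif patch[k] is not None: kept.append((k, patch[k]))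
      ([] : List (String × Option String))
    let new := p.filter (fun kv =>
      kv.2.isSome && !(base.any (fun b => b.1 == kv.1)))                     -- [(k, v) for k, v in patch.items() if v is not None and k not in base]
    (PySem.Dict.ofList (kept ++ new)).items                                  -- return dict(kept + new)

-- ===== PRECONDITION & SPEC =====
-- Pre_ excludes association lists with duplicate keys (in base or in patch): those do not represent a
-- Python dict, and which occurrence wins on them is an artefact of the list representation, not of A.
def Pre_merge_mapping_py (base : List (String × Option String)) (patch : Option (List (String × Option String))) : Prop :=
  (base.map Prod.fst).Nodup ∧ ((patch.getD []).map Prod.fst).Nodup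
instance (base : List (String × Option String)) (patch : Option (List (String × Option String))) : Decidable (Pre_merge_mapping_py base patch) := by unfold Pre_merge_mapping_py; infer_instance

def pvWitness_merge_mapping_py : (List (String × Option String)) × (Option (List (String × Option String))) :=
  ([("a", some "1"), ("b", none)], some [("a", none), ("c", some "2")])

def Spec_merge_mapping_py (base : List (String × Option String)) (patch : Option (List (String × Option String))) (out : List (String × Option String)) : Prop := out = merge_mapping_py_alt base patch
instance (base : List (String × Option String)) (patch : Option (List (String × Option String))) (out : List (String × Option String)) : Decidable (Spec_merge_mapping_py base patch out) := by unfold Spec_merge_mapping_py; infer_instance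

-- ===== CLAIM (what is proved, stated in full; the proofs are below) =====
def Claim_equal_merge_mapping_py : Prop := ∀ (base : List (String × Option String)) (patch : Option (List (String × Option String))), Dom_merge_mapping_py base patch → Pre_merge_mapping_py base patch → Spec_merge_mapping_py base patch (merge_mapping_py base patch)

-- ===== LEMMAS AND PROOFS =====

-- keys of patch entries whose value is None
def pvDropKeys (p : List (String × Option String)) : List String :=
  (p.filter (fun kv => kv.2.isNone)).map (·.1)

-- value of a base entry after A's update pass: patched if its key occurs in l, else unchanged
def pvOverride (l : List (String × Option String)) (kv : String × Option String) : String × Option String :=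
  match l.find? (fun q => q.1 == kv.1) with
  | some q => (kv.1, q.2)
  | none => kv

lemma pv_ofList_items_of_nodup (l : List (String × Option String))
    (h : (l.map Prod.fst).Nodup) : (PySem.Dict.ofList l).items = l := by
  unfold PySem.Dict.ofList PySem.Dict.update
  have := PySem.Dict.items_foldl_insert_fresh l Prod.fst Prod.snd PySem.Dict.empty
    (by intro a _; rfl) h
  simpa using this

lemma pv_mem_dropKeys {x : String} {p : List (String × Option String)} (h : x ∈ pvDropKeys p) :
    x ∈ p.map Prod.fst := by
  simp only [pvDropKeys, List.mem_map] at h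
  obtain ⟨kv, hkv, rfl⟩ := h
  exact List.mem_map_of_mem (List.mem_of_mem_filter hkv)

-- A's interleaved erase/insert loop = drop the None-keys from m, then bulk-insert the non-None entries
lemma pv_filter_insert_comm (m : PySem.Dict String (Option String)) (k : String)
    (v : Option String) (P : String → Bool) (hP : P k = true) :
    PySem.Dict.mk ((m.insert k v).items.filter (fun kv => P kv.1)) =
      (PySem.Dict.mk (m.items.filter (fun kv => P kv.1))).insert k v := by
  have hc : (PySem.Dict.mk (m.items.filter (fun kv => P kv.1))).contains k = m.contains k := by
    simp only [PySem.Dict.contains]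
    cases hm : m.items.any (fun p => p.1 == k) with
    | true =>
      simp only [List.any_eq_true] at hm ⊢
      obtain ⟨p, hp, hpk⟩ := hm
      have : p.1 = k := by simpa using hpk
      exact ⟨p, List.mem_filter.2 ⟨hp, by rw [this]; exact hP⟩, hpk⟩
    | false =>
      simp only [List.any_eq_false] at hm ⊢
      intro p hp; exact hm p (List.mem_filter.1 hp).1
  by_cases hck : m.contains k
  · rw [PySem.Dict.insert, if_pos hck, PySem.Dict.insert, hc, if_pos hck]
    simp only [PySem.Dict.mk.injEq]
    rw [List.filter_map]
    congr 1
    apply List.filter_congr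
    intro p _
    by_cases h : p.1 = k
    · simp [Function.comp, h, hP]
    · simp [Function.comp, h]
  · rw [PySem.Dict.insert, if_neg hck, PySem.Dict.insert, hc, if_neg hck]
    simp only [PySem.Dict.mk.injEq]
    rw [List.filter_append]
    simp [hP]

lemma pv_fold_eq (p : List (String × Option String)) (hp : (p.map Prod.fst).Nodup) :
    ∀ m : PySem.Dict String (Option String),
    p.foldl (fun m kv => if kv.2.isNone then m.erase kv.1 else m.insert kv.1 kv.2) m =
      (PySem.Dict.mk (m.items.filter (fun kv => decide (kv.1 ∉ pvDropKeys p)))).update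
        (p.filter (fun kv => kv.2.isSome)) := by
  induction p with
  | nil => intro m; simp [pvDropKeys, PySem.Dict.update]
  | cons kv rest ih =>
    obtain ⟨k, val⟩ := kv
    simp only [List.map_cons, List.nodup_cons] at hp
    obtain ⟨hk, hrest⟩ := hp
    intro m
    cases val with
    | none =>
      rw [List.foldl_cons]
      simp only [Option.isNone_none, if_true]
      rw [ih hrest (m.erase k)]
      have hitems : (m.erase k).items.filter (fun kv => decide (kv.1 ∉ pvDropKeys rest)) =
          m.items.filter (fun kv => decide (kv.1 ∉ pvDropKeys ((k, none) :: rest))) := by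
        show ((m.items.filter _).filter _) = _
        rw [List.filter_filter]
        apply List.filter_congr
        intro x _
        by_cases hx : x.1 = k
        · simp [pvDropKeys, hx]
        · simp [pvDropKeys, hx]
      rw [hitems, List.filter_cons_of_neg (by simp)]
    | some s =>
      rw [List.foldl_cons]
      simp only [Option.isNone_some, Bool.false_eq_true, if_false]
      rw [ih hrest (m.insert k (some s))]
      have hk' : (fun x => decide (x ∉ pvDropKeys rest)) k = true := by
        simp only [decide_eq_true_eq]
        intro hmem; exact hk (pv_mem_dropKeys hmem)
      rw [pv_filter_insert_comm m k (some s) (fun x => decide (x ∉ pvDropKeys rest)) hk']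
      have hdk : pvDropKeys ((k, some s) :: rest) = pvDropKeys rest := by simp [pvDropKeys]
      rw [hdk]
      show (_ : PySem.Dict _ _).update _ = PySem.Dict.update _ (((k, some s) :: rest).filter _)
      rw [List.filter_cons_of_pos (by simp)]
      rfl

-- items of a bulk update: existing entries get their value overridden, new keys are appended
lemma pv_update_items (l : List (String × Option String)) :
    ∀ d : PySem.Dict String (Option String), d.keys.Nodup → (l.map Prod.fst).Nodup →
    (d.update l).items =
      d.items.map (pvOverride l) ++ l.filter (fun q => !(d.contains q.1)) := by
  induction l with
  | nil =>
    intro d _ _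
    simp only [PySem.Dict.update, List.foldl_nil, List.filter_nil, List.append_nil]
    rw [List.map_congr_left (fun kv _ => show pvOverride [] kv = id kv from rfl), List.map_id]
  | cons kv rest ih =>
    obtain ⟨k, v⟩ := kv
    intro d hd hl
    simp only [List.map_cons, List.nodup_cons] at hl
    obtain ⟨hk, hrest⟩ := hl
    have hstep : (d.update ((k, v) :: rest)) = ((d.insert k v).update rest) := rfl
    rw [hstep, ih (d.insert k v) (PySem.Dict.nodup_keys_insert d k v hd) hrest]
    have hfindrest : rest.find? (fun q => q.1 == k) = none := by
      apply List.find?_eq_none.2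
      intro q hq hq'
      have hq1 : q.1 = k := by simpa using hq'
      exact hk (hq1 ▸ List.mem_map_of_mem (f := Prod.fst) hq)
    cases hc : d.contains k with
    | true =>
      rw [PySem.Dict.items_insert_of_contains d v hc]
      rw [List.map_map]
      have hmap : d.items.map (pvOverride rest ∘ fun p => if p.1 == k then (k, v) else p) =
          d.items.map (pvOverride ((k, v) :: rest)) := by
        apply List.map_congr_left
        intro p _
        show pvOverride rest (if p.1 == k then (k, v) else p) = pvOverride ((k, v) :: rest) p
        by_cases hp : p.1 = k
        · rw [if_pos (by simp [hp])]
          simp only [pvOverride]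
          rw [hfindrest,
            List.find?_cons_of_pos (p := fun q => q.1 == p.1) (l := rest)
              (show ((k, v).1 == p.1) = true by simp [hp])]
          simp [hp]
        · rw [if_neg (by simp [hp])]
          simp only [pvOverride]
          rw [List.find?_cons_of_neg (p := fun q => q.1 == p.1) (l := rest)
            (show ¬(((k, v).1 == p.1) = true) by simpa using fun h => hp h.symm)]
      have hfilt : rest.filter (fun q => !((d.insert k v).contains q.1)) =
          rest.filter (fun q => !(d.contains q.1)) := by
        apply List.filter_congr
        intro q _
        rw [PySem.Dict.contains_insert d k q.1 v]
        by_cases hq : q.1 = k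
        · simp [hq, hc]
        · simp [hq]
      rw [hmap, hfilt, List.filter_cons_of_neg (by simp [hc])]
    | false =>
      rw [PySem.Dict.items_insert_of_not_contains d v hc]
      rw [List.map_append]
      have hknotin : ∀ p ∈ d.items, (p.1 == k) = false := by
        intro p hp
        cases hbk : (p.1 == k) with
        | false => rfl
        | true =>
          have : d.items.any (fun q => q.1 == k) = true :=
            List.any_eq_true.2 ⟨p, hp, hbk⟩
          rw [show d.items.any (fun q => q.1 == k) = d.contains k from rfl, hc] at this
          exact absurd this (by simp)
      have hmap : d.items.map (pvOverride rest) = d.items.map (pvOverride ((k, v) :: rest)) := by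
        apply List.map_congr_left
        intro p hp
        simp only [pvOverride]
        rw [List.find?_cons_of_neg (by
          have hpk := hknotin p hp
          simp only [beq_eq_false_iff_ne, ne_eq] at hpk
          simpa using fun h => hpk h.symm)]
      have hhead : pvOverride rest (k, v) = (k, v) := by
        simp only [pvOverride]; rw [hfindrest]
      have hfilt : rest.filter (fun q => !((d.insert k v).contains q.1)) =
          rest.filter (fun q => !(d.contains q.1)) := by
        apply List.filter_congr
        intro q hq
        rw [PySem.Dict.contains_insert d k q.1 v]
        have hq1 : q.1 ≠ k := by
          intro h; exact hk (h ▸ List.mem_map_of_mem (f := Prod.fst) hq)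
        simp [hq1]
      rw [hmap, List.map_singleton, hhead, hfilt, List.filter_cons_of_pos (by simp [hc])]
      simp

-- B's base loop as a filterMap
lemma pv_kept_eq_filterMap (p : List (String × Option String)) :
    ∀ (base : List (String × Option String)) (acc : List (String × Option String)),
    base.foldl (fun acc kv =>
      match p.find? (fun q => q.1 == kv.1) with
      | none => acc ++ [kv]
      | some q => if q.2.isSome then acc ++ [(kv.1, q.2)] else acc) acc =
    acc ++ base.filterMap (fun kv =>
      match p.find? (fun q => q.1 == kv.1) with
      | none => some kv
      | some q => if q.2.isSome then some (kv.1, q.2) else none) := by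
  intro base
  induction base with
  | nil => intro acc; simp
  | cons kv rest ih =>
    intro acc
    rw [List.foldl_cons, List.filterMap_cons]
    cases hf : p.find? (fun q => q.1 == kv.1) with
    | none => rw [ih]; simp
    | some q =>
      cases hq : q.2.isSome with
      | true => rw [ih]; simp [hq]
      | false => rw [ih]; simp [hq]

lemma pv_filterMap_eq_map_filter {α β : Type} (f : α → Option β) (P : α → Bool) (g : α → β)
    (h : ∀ x, f x = if P x then some (g x) else none) (l : List α) :
    l.filterMap f = (l.filter P).map g := by
  induction l with
  | nil => rfl
  | cons x xs ih =>
    rw [List.filterMap_cons, h x]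
    by_cases hx : P x
    · rw [if_pos hx, List.filter_cons_of_pos hx, List.map_cons, ih]
    · rw [if_neg hx, List.filter_cons_of_neg (by simpa using hx), ih]

-- with nodup patch keys: a non-None entry's key is not a drop key, and its first match in the
-- non-None sublist is itself
lemma pv_find_some_isSome {p : List (String × Option String)} (hp : (p.map Prod.fst).Nodup)
    {x : String} {q : String × Option String}
    (hfind : p.find? (fun r => r.1 == x) = some q) (hq : q.2.isSome = true) :
    x ∉ pvDropKeys p ∧
      (p.filter (fun kv => kv.2.isSome)).find? (fun r => r.1 == x) = some q := by
  have hqmem : q ∈ p := List.mem_of_find?_eq_some hfind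
  have hqx : q.1 = x := by simpa using List.find?_some hfind
  have huniq : ∀ r ∈ p, r.1 = x → r = q := by
    intro r hr hrx
    exact List.inj_on_of_nodup_map hp hr hqmem (by rw [hrx, hqx])
  constructor
  · intro hmem
    simp only [pvDropKeys, List.mem_map] at hmem
    obtain ⟨r, hr, hrx⟩ := hmem
    have hrmem := List.mem_of_mem_filter hr
    have hrnone : r.2.isNone = true := (List.mem_filter.1 hr).2
    have := huniq r hrmem hrx
    rw [this] at hrnone
    simp [Option.isNone_iff_eq_none] at hrnone
    rw [hrnone] at hq; simp at hq
  · have hqfilt : q ∈ p.filter (fun kv => kv.2.isSome) := List.mem_filter.2 ⟨hqmem, hq⟩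
    cases hf : (p.filter (fun kv => kv.2.isSome)).find? (fun r => r.1 == x) with
    | none =>
      exact absurd (by simp [hqx] : (q.1 == x) = true)
        (by simpa using List.find?_eq_none.1 hf q hqfilt)
    | some r =>
      have hrx : r.1 = x := by simpa using List.find?_some hf
      have hrmem : r ∈ p := List.mem_of_mem_filter (List.mem_of_find?_eq_some hf)
      rw [huniq r hrmem hrx]

-- ===== VERDICT (by name: the statement is the Claim_ definition above) =====
theorem merge_mapping_py_spec : Claim_equal_merge_mapping_py := by
  intro base patch _hdom hpre
  obtain ⟨hbase, hpatch⟩ := hpre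
  unfold Spec_merge_mapping_py
  cases patch with
  | none => rfl
  | some p =>
    simp only [Option.getD_some] at hpatch
    simp only [merge_mapping_py, merge_mapping_py_alt]
    -- A side
    have hof : PySem.Dict.ofList base = PySem.Dict.mk base :=
      PySem.Dict.ext (pv_ofList_items_of_nodup base hbase)
    rw [hof, pv_fold_eq p hpatch (PySem.Dict.mk base)]
    set fb := base.filter (fun kv => decide (kv.1 ∉ pvDropKeys p)) with hfb
    set ps := p.filter (fun kv => kv.2.isSome) with hps
    have hfbkeys : (fb.map Prod.fst).Nodup := hbase.sublist (List.filter_sublist.map Prod.fst)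
    have hpskeys : (ps.map Prod.fst).Nodup := hpatch.sublist (List.filter_sublist.map Prod.fst)
    have hdkeys : (PySem.Dict.mk fb).keys.Nodup := by
      simpa [PySem.Dict.keys] using hfbkeys
    rw [pv_update_items ps (PySem.Dict.mk fb) hdkeys hpskeys]
    -- B side: kept = fb.map (pvOverride ps)
    have hpoint : ∀ kv : String × Option String,
        (match p.find? (fun q => q.1 == kv.1) with
          | none => some kv
          | some q => if q.2.isSome then some (kv.1, q.2) else none) =
        if decide (kv.1 ∉ pvDropKeys p) then some (pvOverride ps kv) else none := by
      intro kv
      cases hf : p.find? (fun q => q.1 == kv.1) with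
      | none =>
        have hnotp : kv.1 ∉ p.map Prod.fst := by
          intro hmem
          simp only [List.mem_map] at hmem
          obtain ⟨r, hr, hrx⟩ := hmem
          exact absurd (by simp [hrx] : (r.1 == kv.1) = true)
            (by simpa using List.find?_eq_none.1 hf r hr)
        have hnd : kv.1 ∉ pvDropKeys p := fun h => hnotp (pv_mem_dropKeys h)
        have hfps : ps.find? (fun q => q.1 == kv.1) = none := by
          apply List.find?_eq_none.2
          intro q hq
          exact List.find?_eq_none.1 hf q (List.mem_of_mem_filter hq)
        show some kv = _
        rw [if_pos (by simpa using hnd)]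
        simp only [pvOverride]
        rw [hfps]
      | some q =>
        cases hq : q.2.isSome with
        | true =>
          obtain ⟨hnd, hfps⟩ := pv_find_some_isSome hpatch hf hq
          show (if q.2.isSome then some (kv.1, q.2) else none) = _
          rw [hq, if_pos rfl, if_pos (by simpa using hnd)]
          simp only [pvOverride]
          rw [hfps]
        | false =>
          have hqmem : q ∈ p := List.mem_of_find?_eq_some hf
          have hqx : q.1 = kv.1 := by simpa using List.find?_some hf
          have hq2 : q.2 = none := by
            cases h2 : q.2 with
            | none => rfl
            | some s => rw [h2] at hq; simp at hq
          have hdrop : kv.1 ∈ pvDropKeys p := by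
            simp only [pvDropKeys, List.mem_map]
            exact ⟨q, List.mem_filter.2 ⟨hqmem, by simp [hq2]⟩, hqx⟩
          show (if q.2.isSome then some (kv.1, q.2) else none) = _
          rw [hq, if_neg (by simp), if_neg (by simpa using hdrop)]
    rw [pv_kept_eq_filterMap p base [], List.nil_append,
      pv_filterMap_eq_map_filter _ _ _ hpoint base, ← hfb]
    -- B side: new = ps.filter (∉ fb)
    have hnew : p.filter (fun kv => kv.2.isSome && !(base.any (fun b => b.1 == kv.1))) =
        ps.filter (fun q => !((PySem.Dict.mk fb).contains q.1)) := by
      rw [hps, List.filter_filter]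
      apply List.filter_congr
      intro kv hkv
      cases hq : kv.2.isSome with
      | false => simp
      | true =>
        have hcont : (PySem.Dict.mk fb).contains kv.1 = base.any (fun b => b.1 == kv.1) := by
          show fb.any (fun b => b.1 == kv.1) = base.any (fun b => b.1 == kv.1)
          cases hb : base.any (fun b => b.1 == kv.1) with
          | false =>
            simp only [List.any_eq_false] at hb ⊢
            intro b hbf; exact hb b (List.mem_of_mem_filter hbf)
          | true =>
            simp only [List.any_eq_true] at hb ⊢
            obtain ⟨b, hbmem, hbk⟩ := hb
            have hbk' : b.1 = kv.1 := by simpa using hbk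
            have hnd : kv.1 ∉ pvDropKeys p := by
              cases hf : p.find? (fun r => r.1 == kv.1) with
              | none =>
                exact absurd (by simp : (kv.1 == kv.1) = true)
                  (by simpa using List.find?_eq_none.1 hf kv hkv)
              | some q =>
                have hqkv : q = kv := by
                  have hqmem := List.mem_of_find?_eq_some hf
                  have hqx : q.1 = kv.1 := by simpa using List.find?_some hf
                  exact List.inj_on_of_nodup_map hpatch hqmem hkv hqx
                exact (pv_find_some_isSome hpatch hf (hqkv ▸ hq)).1
            refine ⟨b, List.mem_filter.2 ⟨hbmem, ?_⟩, hbk⟩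
            rw [hfb] at *
            simpa [hbk'] using hnd
        simp [hcont]
    rw [hnew]
    -- strip the final dict(kept + new)
    apply (pv_ofList_items_of_nodup _ _).symm
    rw [List.map_append]
    have hkeptkeys : (fb.map (pvOverride ps)).map Prod.fst = fb.map Prod.fst := by
      rw [List.map_map]
      apply List.map_congr_left
      intro kv _
      simp only [Function.comp, pvOverride]
      cases ps.find? (fun q => q.1 == kv.1) <;> rfl
    rw [hkeptkeys]
    have hnewkeys : ((ps.filter (fun q => !((PySem.Dict.mk fb).contains q.1))).map Prod.fst).Nodup :=
      hpskeys.sublist (List.filter_sublist.map Prod.fst)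
    apply List.Nodup.append hfbkeys hnewkeys
    intro x hx1 hx2
    simp only [List.mem_map] at hx1 hx2
    obtain ⟨b, hbf, hbx⟩ := hx1
    obtain ⟨q, hqf, hqx⟩ := hx2
    have hqc : ((PySem.Dict.mk fb).contains q.1) = false := by
      have := (List.mem_filter.1 hqf).2
      simpa using this
    have : (PySem.Dict.mk fb).contains q.1 = true := by
      show fb.any (fun r => r.1 == q.1) = true
      exact List.any_eq_true.2 ⟨b, hbf, by simp [hbx, hqx]⟩
    rw [hqc] at this; exact absurd this (by simp)
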